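-- pv_equiv track=rewrite | github.com/ducloi18/cki_lt | cuoiky23.py | question_32_m
-- ===== SOURCE A (Python) =====
-- def question_32_m(ds):
--     ds_moi = sorted(ds, reverse= False)
--     chan = []
--     le = []
--     for i in ds_moi:
--         if i % 2 == 0:
--             chan.append(i)
--         else:
--             le.append(i)
--     capchan = tuple(chan)
--     capchan = sorted(capchan, reverse= True)
--     caple = tuple(le)
--     caple = sorted(caple, reverse= False)
--     return capchan, caple
-- ===== SOURCE B (Python) =====
-- def question_32_m(ds):
--     evens_desc = []
--     odds_asc = []
--     for x in ds:
--         if x % 2 == 0: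
--             lo, hi = 0, len(evens_desc)
--             while lo < hi:
--                 mid = (lo + hi) // 2
--                 if evens_desc[mid] > x:
--                     lo = mid + 1
--                 else:
--                     hi = mid
--             evens_desc.insert(lo, x)
--         else:
--             lo, hi = 0, len(odds_asc)
--             while lo < hi:
--                 mid = (lo + hi) // 2
--                 if odds_asc[mid] < x:
--                     lo = mid + 1
--                 else:
--                     hi = mid
--             odds_asc.insert(lo, x)
--     return evens_desc, odds_asc
-- ===== Notes on version B (the rewrite author's own statement) =====
-- stated objective: alternative
-- what changed: Replaces A's sort-then-partition-then-two-more-sorts with a single pass that binary-searches the insertion point and inserts each element directly into a descending evens accumulator or an ascending odds accumulator, using no library sort at all.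
import Mathlib
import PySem

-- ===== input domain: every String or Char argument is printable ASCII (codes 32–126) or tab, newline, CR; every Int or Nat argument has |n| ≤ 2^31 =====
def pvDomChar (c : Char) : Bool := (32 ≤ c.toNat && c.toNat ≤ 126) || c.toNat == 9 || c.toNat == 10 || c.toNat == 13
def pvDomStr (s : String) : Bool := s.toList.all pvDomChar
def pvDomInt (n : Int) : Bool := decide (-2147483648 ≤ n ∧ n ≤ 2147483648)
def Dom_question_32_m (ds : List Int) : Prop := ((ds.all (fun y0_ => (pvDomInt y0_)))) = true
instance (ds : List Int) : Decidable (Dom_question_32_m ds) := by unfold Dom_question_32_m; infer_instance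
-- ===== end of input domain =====

-- B replaces A's sort/partition/two-more-sorts with a single pass that binary-searches the
-- insertion point and inserts each element into a descending evens / ascending odds accumulator.

-- ===== PORT A =====
def question_32_m (ds : List Int) : List Int × List Int :=
  let ds_moi := PySem.List.sorted ds (fun x => x) false
  let p := ds_moi.foldl
    (fun (p : List Int × List Int) i =>
      if PySem.Int.mod i 2 == 0 then (p.1 ++ [i], p.2) else (p.1, p.2 ++ [i]))
    ([], [])
  let capchan := PySem.List.sorted p.1 (fun x => x) true
  let caple := PySem.List.sorted p.2 (fun x => x) false
  (capchan, caple)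

-- ===== PORT B =====
-- Source B's `while lo < hi: mid = (lo+hi)//2; if l[mid] > x: lo = mid+1 else: hi = mid`.
-- lo, hi are nonnegative and mid is always in range (lo ≤ mid < hi ≤ len), so Nat counters,
-- Nat division for `(lo+hi)//2` and pyGetD (whose default is never used) are exact here.
def findDesc (x : Int) (l : List Int) (lo hi : Nat) : Nat :=
  if lo < hi then
    let mid := (lo + hi) / 2
    if x < PySem.List.pyGetD l (mid : Int) 0 then findDesc x l (mid + 1) hi
    else findDesc x l lo mid
  else lo
termination_by hi - lo
decreasing_by all_goals omega

-- same loop with the comparison `l[mid] < x` (the odds branch of Source B)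
def findAsc (x : Int) (l : List Int) (lo hi : Nat) : Nat :=
  if lo < hi then
    let mid := (lo + hi) / 2
    if PySem.List.pyGetD l (mid : Int) 0 < x then findAsc x l (mid + 1) hi
    else findAsc x l lo mid
  else lo
termination_by hi - lo
decreasing_by all_goals omega

def question_32_m_alt (ds : List Int) : List Int × List Int :=
  ds.foldl
    (fun (p : List Int × List Int) x =>
      if PySem.Int.mod x 2 == 0 then
        (PySem.List.insert p.1 ((findDesc x p.1 0 p.1.length : Nat) : Int) x, p.2)
      else
        (p.1, PySem.List.insert p.2 ((findAsc x p.2 0 p.2.length : Nat) : Int) x))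
    ([], [])

-- ===== PRECONDITION & SPEC =====
def Spec_question_32_m (ds : List Int) (out : List Int × List Int) : Prop := out = question_32_m_alt ds
instance (ds : List Int) (out : List Int × List Int) : Decidable (Spec_question_32_m ds out) := by unfold Spec_question_32_m; infer_instance

-- ===== CLAIM (what is proved, stated in full; the proofs are below) =====
def Claim_equal_question_32_m : Prop := ∀ (ds : List Int), Dom_question_32_m ds → Spec_question_32_m ds (question_32_m ds)

-- ===== LEMMAS AND PROOFS =====

-- A's partition loop computes the two parity filters of the traversed list.
theorem part_foldl (xs c l : List Int) :
    xs.foldl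
      (fun (p : List Int × List Int) i =>
        if PySem.Int.mod i 2 == 0 then (p.1 ++ [i], p.2) else (p.1, p.2 ++ [i]))
      (c, l)
    = (c ++ xs.filter (fun x => PySem.Int.mod x 2 == 0),
       l ++ xs.filter (fun x => !(PySem.Int.mod x 2 == 0))) := by
  induction xs generalizing c l with
  | nil => simp
  | cons a t ih =>
    rw [List.foldl_cons]
    by_cases h : (PySem.Int.mod a 2 == 0) = true
    · rw [if_pos h, ih, List.filter_cons, List.filter_cons,
        if_pos h, if_neg (by rw [h]; decide)]
      simp
    · rw [if_neg h, ih, List.filter_cons, List.filter_cons,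
        if_neg h, if_pos (by rw [Bool.not_eq_true] at h; rw [h]; decide)]
      simp

-- monotone access into a descending list
theorem getD_anti_of_pairwise_ge (l : List Int)
    (hs : l.Pairwise (fun a b : Int => b ≤ a)) {i j : Nat}
    (hij : i ≤ j) (hj : j < l.length) : l.getD j 0 ≤ l.getD i 0 := by
  rcases eq_or_lt_of_le hij with h | h
  · subst h; exact le_refl _
  · rw [List.getD_eq_getElem l 0 hj, List.getD_eq_getElem l 0 (lt_of_le_of_lt hij hj)]
    exact (List.pairwise_iff_getElem.1 hs) i j _ hj h

theorem getD_mono_of_pairwise_le (l : List Int)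
    (hs : l.Pairwise (fun a b : Int => a ≤ b)) {i j : Nat}
    (hij : i ≤ j) (hj : j < l.length) : l.getD i 0 ≤ l.getD j 0 := by
  rcases eq_or_lt_of_le hij with h | h
  · subst h; exact le_refl _
  · rw [List.getD_eq_getElem l 0 hj, List.getD_eq_getElem l 0 (lt_of_le_of_lt hij hj)]
    exact (List.pairwise_iff_getElem.1 hs) i j _ hj h

-- binary-search invariant: the returned index splits the descending list into a > x prefix and a ≤ x suffix
theorem findDesc_spec (x : Int) (l : List Int)
    (hs : l.Pairwise (fun a b : Int => b ≤ a)) :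
    ∀ (n lo hi : Nat), hi - lo ≤ n → hi ≤ l.length → lo ≤ hi →
    (∀ j, j < lo → x < l.getD j 0) →
    (∀ j, hi ≤ j → j < l.length → l.getD j 0 ≤ x) →
    findDesc x l lo hi ≤ l.length ∧
    (∀ j, j < findDesc x l lo hi → x < l.getD j 0) ∧
    (∀ j, findDesc x l lo hi ≤ j → j < l.length → l.getD j 0 ≤ x) := by
  intro n
  induction n with
  | zero =>
    intro lo hi hn hlen hle hpre hsuf
    have : lo = hi := by omega
    rw [findDesc, if_neg (by omega)]
    exact ⟨by omega, hpre, by subst this; exact hsuf⟩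
  | succ n ih =>
    intro lo hi hn hlen hle hpre hsuf
    rw [findDesc]
    by_cases hlt : lo < hi
    · rw [if_pos hlt]
      have hmid : (lo + hi) / 2 < l.length := by omega
      simp only [PySem.List.pyGetD_natCast]
      by_cases hc : x < l.getD ((lo + hi) / 2) 0
      · rw [if_pos hc]
        refine ih ((lo + hi) / 2 + 1) hi (by omega) hlen (by omega) ?_ hsuf
        intro j hj
        rcases Nat.lt_or_ge j lo with h | h
        · exact hpre j h
        · exact lt_of_lt_of_le hc (getD_anti_of_pairwise_ge l hs (by omega) hmid)
      · rw [if_neg hc]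
        refine ih lo ((lo + hi) / 2) (by omega) (by omega) (by omega) hpre ?_
        intro j hj hjl
        rcases Nat.lt_or_ge j hi with h | h
        · exact le_trans (getD_anti_of_pairwise_ge l hs hj hjl) (not_lt.1 hc)
        · exact hsuf j h hjl
    · rw [if_neg hlt]
      have : lo = hi := by omega
      exact ⟨by omega, hpre, by subst this; exact hsuf⟩

-- same invariant for the ascending list: ≤ x prefix... (strict < prefix, ≥ suffix)
theorem findAsc_spec (x : Int) (l : List Int)
    (hs : l.Pairwise (fun a b : Int => a ≤ b)) :
    ∀ (n lo hi : Nat), hi - lo ≤ n → hi ≤ l.length → lo ≤ hi →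
    (∀ j, j < lo → l.getD j 0 < x) →
    (∀ j, hi ≤ j → j < l.length → x ≤ l.getD j 0) →
    findAsc x l lo hi ≤ l.length ∧
    (∀ j, j < findAsc x l lo hi → l.getD j 0 < x) ∧
    (∀ j, findAsc x l lo hi ≤ j → j < l.length → x ≤ l.getD j 0) := by
  intro n
  induction n with
  | zero =>
    intro lo hi hn hlen hle hpre hsuf
    have : lo = hi := by omega
    rw [findAsc, if_neg (by omega)]
    exact ⟨by omega, hpre, by subst this; exact hsuf⟩
  | succ n ih =>
    intro lo hi hn hlen hle hpre hsuf
    rw [findAsc]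
    by_cases hlt : lo < hi
    · rw [if_pos hlt]
      have hmid : (lo + hi) / 2 < l.length := by omega
      simp only [PySem.List.pyGetD_natCast]
      by_cases hc : l.getD ((lo + hi) / 2) 0 < x
      · rw [if_pos hc]
        refine ih ((lo + hi) / 2 + 1) hi (by omega) hlen (by omega) ?_ hsuf
        intro j hj
        rcases Nat.lt_or_ge j lo with h | h
        · exact hpre j h
        · exact lt_of_le_of_lt (getD_mono_of_pairwise_le l hs (by omega) hmid) hc
      · rw [if_neg hc]
        refine ih lo ((lo + hi) / 2) (by omega) (by omega) (by omega) hpre ?_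
        intro j hj hjl
        rcases Nat.lt_or_ge j hi with h | h
        · exact le_trans (not_lt.1 hc) (getD_mono_of_pairwise_le l hs hj hjl)
        · exact hsuf j h hjl
    · rw [if_neg hlt]
      have : lo = hi := by omega
      exact ⟨by omega, hpre, by subst this; exact hsuf⟩

-- inserting at an index that splits a descending list keeps it descending, and is a perm of cons
theorem insert_split_pairwise_ge (x : Int) (l : List Int) (p : Nat) (hp : p ≤ l.length)
    (hs : l.Pairwise (fun a b : Int => b ≤ a))
    (h1 : ∀ j, j < p → x < l.getD j 0)
    (h2 : ∀ j, p ≤ j → j < l.length → l.getD j 0 ≤ x) :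
    (l.take p ++ x :: l.drop p).Pairwise (fun a b : Int => b ≤ a) := by
  rw [List.pairwise_append]
  refine ⟨hs.sublist (List.take_sublist p l), ?_, ?_⟩
  · rw [List.pairwise_cons]
    refine ⟨fun b hb => ?_, hs.sublist (List.drop_sublist p l)⟩
    rcases List.mem_iff_getElem.1 hb with ⟨k, hk, hbk⟩
    rw [List.getElem_drop] at hbk
    have := h2 (p + k) (by omega) (by simp [List.length_drop] at hk; omega)
    rw [List.getD_eq_getElem l 0 (by simp [List.length_drop] at hk; omega)] at this
    exact hbk ▸ this
  · intro a ha b hb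
    rcases List.mem_iff_getElem.1 ha with ⟨j, hj, haj⟩
    rw [List.getElem_take] at haj
    have hjp : j < p := by simp [List.length_take] at hj; omega
    have hxa : x < a := by
      have := h1 j hjp
      rw [List.getD_eq_getElem l 0 (by omega)] at this
      exact haj ▸ this
    rcases List.mem_cons.1 hb with hb' | hb'
    · exact hb' ▸ le_of_lt hxa
    · rcases List.mem_iff_getElem.1 hb' with ⟨k, hk, hbk⟩
      rw [List.getElem_drop] at hbk
      have := h2 (p + k) (by omega) (by simp [List.length_drop] at hk; omega)
      rw [List.getD_eq_getElem l 0 (by simp [List.length_drop] at hk; omega)] at this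
      exact le_of_lt (lt_of_le_of_lt (hbk ▸ this) hxa)

theorem insert_split_pairwise_le (x : Int) (l : List Int) (p : Nat) (hp : p ≤ l.length)
    (hs : l.Pairwise (fun a b : Int => a ≤ b))
    (h1 : ∀ j, j < p → l.getD j 0 < x)
    (h2 : ∀ j, p ≤ j → j < l.length → x ≤ l.getD j 0) :
    (l.take p ++ x :: l.drop p).Pairwise (fun a b : Int => a ≤ b) := by
  rw [List.pairwise_append]
  refine ⟨hs.sublist (List.take_sublist p l), ?_, ?_⟩
  · rw [List.pairwise_cons]
    refine ⟨fun b hb => ?_, hs.sublist (List.drop_sublist p l)⟩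
    rcases List.mem_iff_getElem.1 hb with ⟨k, hk, hbk⟩
    rw [List.getElem_drop] at hbk
    have := h2 (p + k) (by omega) (by simp [List.length_drop] at hk; omega)
    rw [List.getD_eq_getElem l 0 (by simp [List.length_drop] at hk; omega)] at this
    exact hbk ▸ this
  · intro a ha b hb
    rcases List.mem_iff_getElem.1 ha with ⟨j, hj, haj⟩
    rw [List.getElem_take] at haj
    have hjp : j < p := by simp [List.length_take] at hj; omega
    have hxa : a < x := by
      have := h1 j hjp
      rw [List.getD_eq_getElem l 0 (by omega)] at this
      exact haj ▸ this
    rcases List.mem_cons.1 hb with hb' | hb'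
    · exact hb' ▸ le_of_lt hxa
    · rcases List.mem_iff_getElem.1 hb' with ⟨k, hk, hbk⟩
      rw [List.getElem_drop] at hbk
      have := h2 (p + k) (by omega) (by simp [List.length_drop] at hk; omega)
      rw [List.getD_eq_getElem l 0 (by simp [List.length_drop] at hk; omega)] at this
      exact le_of_lt (lt_of_lt_of_le hxa (hbk ▸ this))

-- one even step: binary-search insert keeps the accumulator descending and adds x
theorem stepDesc_spec (x : Int) (l : List Int)
    (hs : l.Pairwise (fun a b : Int => b ≤ a)) :
    (PySem.List.insert l ((findDesc x l 0 l.length : Nat) : Int) x).Pairwise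
      (fun a b : Int => b ≤ a) ∧
    (PySem.List.insert l ((findDesc x l 0 l.length : Nat) : Int) x).Perm (x :: l) := by
  obtain ⟨hle, h1, h2⟩ := findDesc_spec x l hs l.length 0 l.length (by omega) (le_refl _)
    (by omega) (by omega) (fun j hj hjl => by omega)
  rw [PySem.List.insert_natCast l _ x hle]
  exact ⟨insert_split_pairwise_ge x l _ hle hs h1 h2,
    List.perm_middle.trans (by rw [List.take_append_drop])⟩

theorem stepAsc_spec (x : Int) (l : List Int)
    (hs : l.Pairwise (fun a b : Int => a ≤ b)) :
    (PySem.List.insert l ((findAsc x l 0 l.length : Nat) : Int) x).Pairwise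
      (fun a b : Int => a ≤ b) ∧
    (PySem.List.insert l ((findAsc x l 0 l.length : Nat) : Int) x).Perm (x :: l) := by
  obtain ⟨hle, h1, h2⟩ := findAsc_spec x l hs l.length 0 l.length (by omega) (le_refl _)
    (by omega) (by omega) (fun j hj hjl => by omega)
  rw [PySem.List.insert_natCast l _ x hle]
  exact ⟨insert_split_pairwise_le x l _ hle hs h1 h2,
    List.perm_middle.trans (by rw [List.take_append_drop])⟩

-- B's fold splits into two independent folds over the parity filters
theorem alt_fold_split (xs : List Int) (e o : List Int) :
    xs.foldl
      (fun (p : List Int × List Int) x =>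
        if PySem.Int.mod x 2 == 0 then
          (PySem.List.insert p.1 ((findDesc x p.1 0 p.1.length : Nat) : Int) x, p.2)
        else
          (p.1, PySem.List.insert p.2 ((findAsc x p.2 0 p.2.length : Nat) : Int) x))
      (e, o)
    = ((xs.filter (fun x => PySem.Int.mod x 2 == 0)).foldl
         (fun l x => PySem.List.insert l ((findDesc x l 0 l.length : Nat) : Int) x) e,
       (xs.filter (fun x => !(PySem.Int.mod x 2 == 0))).foldl
         (fun l x => PySem.List.insert l ((findAsc x l 0 l.length : Nat) : Int) x) o) := by
  induction xs generalizing e o with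
  | nil => simp
  | cons a t ih =>
    rw [List.foldl_cons, List.filter_cons, List.filter_cons]
    by_cases h : (PySem.Int.mod a 2 == 0) = true
    · rw [if_pos h, if_pos h, if_neg (by rw [h]; decide), ih, List.foldl_cons]
    · rw [if_neg h, if_neg h, if_pos (by rw [Bool.not_eq_true] at h; rw [h]; decide), ih,
        List.foldl_cons]

theorem foldl_desc_spec (xs e : List Int) (he : e.Pairwise (fun a b : Int => b ≤ a)) :
    (xs.foldl (fun l x => PySem.List.insert l ((findDesc x l 0 l.length : Nat) : Int) x) e).Pairwise
      (fun a b : Int => b ≤ a) ∧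
    (xs.foldl (fun l x => PySem.List.insert l ((findDesc x l 0 l.length : Nat) : Int) x) e).Perm
      (e ++ xs) := by
  induction xs generalizing e with
  | nil => exact ⟨he, by simp⟩
  | cons a t ih =>
    rw [List.foldl_cons]
    obtain ⟨hp, hperm⟩ := stepDesc_spec a e he
    obtain ⟨hp', hperm'⟩ := ih _ hp
    exact ⟨hp', hperm'.trans ((hperm.append_right t).trans List.perm_middle.symm)⟩

theorem foldl_asc_spec (xs e : List Int) (he : e.Pairwise (fun a b : Int => a ≤ b)) :
    (xs.foldl (fun l x => PySem.List.insert l ((findAsc x l 0 l.length : Nat) : Int) x) e).Pairwise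
      (fun a b : Int => a ≤ b) ∧
    (xs.foldl (fun l x => PySem.List.insert l ((findAsc x l 0 l.length : Nat) : Int) x) e).Perm
      (e ++ xs) := by
  induction xs generalizing e with
  | nil => exact ⟨he, by simp⟩
  | cons a t ih =>
    rw [List.foldl_cons]
    obtain ⟨hp, hperm⟩ := stepAsc_spec a e he
    obtain ⟨hp', hperm'⟩ := ih _ hp
    exact ⟨hp', hperm'.trans ((hperm.append_right t).trans List.perm_middle.symm)⟩

-- two permutations of the same multiset, both ordered the same way, coincide
theorem eq_of_perm_pairwise_le {l₁ l₂ : List Int}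
    (hp : l₁.Perm l₂)
    (h₁ : l₁.Pairwise (fun a b : Int => a ≤ b))
    (h₂ : l₂.Pairwise (fun a b : Int => a ≤ b)) : l₁ = l₂ :=
  hp.eq_of_pairwise (fun _a _b _ _ hab hba => le_antisymm hab hba) h₁ h₂

theorem eq_of_perm_pairwise_ge {l₁ l₂ : List Int}
    (hp : l₁.Perm l₂)
    (h₁ : l₁.Pairwise (fun a b : Int => b ≤ a))
    (h₂ : l₂.Pairwise (fun a b : Int => b ≤ a)) : l₁ = l₂ :=
  hp.eq_of_pairwise (fun _a _b _ _ hab hba => le_antisymm hba hab) h₁ h₂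

theorem question_32_m_eq (ds : List Int) :
    question_32_m ds = question_32_m_alt ds := by
  simp only [question_32_m, question_32_m_alt, part_foldl, alt_fold_split, List.nil_append]
  have hsperm : (PySem.List.sorted ds (fun x => x) false).Perm ds :=
    PySem.List.sorted_perm ds (fun x => x) false
  obtain ⟨hdp, hdperm⟩ := foldl_desc_spec (ds.filter (fun x => PySem.Int.mod x 2 == 0)) []
    (by simp)
  obtain ⟨hap, haperm⟩ := foldl_asc_spec (ds.filter (fun x => !(PySem.Int.mod x 2 == 0))) []
    (by simp)
  refine Prod.ext ?_ ?_ <;> simp only []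
  · -- evens: both sides are ≥-ordered permutations of the even elements of ds
    exact eq_of_perm_pairwise_ge
      (((PySem.List.sorted_perm _ _ _).trans (hsperm.filter _)).trans
        (hdperm.trans (by simp)).symm)
      (PySem.List.sorted_pairwise_rev _ _) hdp
  · -- odds: both sides are ≤-ordered permutations of the odd elements of ds
    exact eq_of_perm_pairwise_le
      (((PySem.List.sorted_perm _ _ _).trans (hsperm.filter _)).trans
        (haperm.trans (by simp)).symm)
      (PySem.List.sorted_pairwise _ _) hap

-- ===== VERDICT (by name: the statement is the Claim_ definition above) =====
theorem question_32_m_spec : Claim_equal_question_32_m := by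
  intro ds _
  exact (question_32_m_eq ds).symm ▸ rfl
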